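-- pv_equiv track=rewrite | github.com/furkankaracamm/stormv2 | storm_modules/study_designer.py | extract_variables
-- ===== SOURCE A (Python) =====
-- from typing import Dict, List
--
-- def extract_variables(hypotheses: List[Dict]) -> Dict:
--     variables = {'independent': [], 'dependent': [], 'moderators': [], 'mediators': [],
--                 'controls': ['age', 'education', 'gender']}
--     for h in hypotheses:
--         if 'IV' in h and h['IV'] not in variables['independent']:
--             variables['independent'].append(h['IV'])
--         if 'DV' in h and h['DV'] not in variables['dependent']:
--             variables['dependent'].append(h['DV'])
--         if h.get('type') == 'moderation' and 'moderator' in h: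
--             variables['moderators'].append(h['moderator'])
--         if h.get('type') == 'mediation' and 'mediator' in h:
--             variables['mediators'].append(h['mediator'])
--     return variables
-- ===== SOURCE B (Python) =====
-- from typing import Dict, List
--
-- def extract_variables(hypotheses: List[Dict]) -> Dict:
--     # Per-category passes; IV/DV dedup works by repeatedly emitting the current
--     # head and filtering every duplicate of it out of the remainder, instead of
--     # testing membership in a growing 'seen' list.
--     def dedup(vals):
--         out = []
--         while vals:
--             head = vals[0]
--             out.append(head)
--             vals = [v for v in vals[1:] if v != head]
--         return out
--     return {
--         'independent': dedup([h['IV'] for h in hypotheses if 'IV' in h]),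
--         'dependent': dedup([h['DV'] for h in hypotheses if 'DV' in h]),
--         'moderators': [h['moderator'] for h in hypotheses
--                        if h.get('type') == 'moderation' and 'moderator' in h],
--         'mediators': [h['mediator'] for h in hypotheses
--                       if h.get('type') == 'mediation' and 'mediator' in h],
--         'controls': ['age', 'education', 'gender'],
--     }
-- ===== Notes on version B (the rewrite author's own statement) =====
-- stated objective: alternative
-- what changed: A's single interleaved loop growing four lists with a membership-tested append is replaced by independent per-category passes where the IV/DV ordered dedup is done by repeatedly emitting the head of the remaining values and filtering all its duplicates out of the rest (no growing 'seen' list is ever scanned).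
import Mathlib
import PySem

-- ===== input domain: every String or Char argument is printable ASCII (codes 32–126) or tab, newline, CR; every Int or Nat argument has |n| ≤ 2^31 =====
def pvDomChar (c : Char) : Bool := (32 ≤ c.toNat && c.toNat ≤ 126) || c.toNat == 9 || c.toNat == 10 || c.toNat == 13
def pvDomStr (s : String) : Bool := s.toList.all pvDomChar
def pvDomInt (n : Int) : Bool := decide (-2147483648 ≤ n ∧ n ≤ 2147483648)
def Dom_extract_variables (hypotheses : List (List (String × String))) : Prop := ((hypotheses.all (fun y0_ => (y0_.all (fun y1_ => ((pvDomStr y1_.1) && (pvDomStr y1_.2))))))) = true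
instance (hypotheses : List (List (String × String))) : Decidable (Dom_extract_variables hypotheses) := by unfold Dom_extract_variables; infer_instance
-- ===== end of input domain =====

-- B replaces A's single interleaved loop (membership-tested appends) by independent
-- per-category passes whose IV/DV dedup repeatedly emits the head and filters its
-- duplicates out of the remainder; objective: alternative, same cost.

-- shared dict primitive: h[k] as first match, 'k' in h as isSome
def hGet? (h : List (String × String)) (k : String) : Option String :=
  (h.find? (fun p => p.1 == k)).map (·.2)

-- ===== PORT A =====
-- A's loop body: the four if-statements, in order, updating the 4-list state
def stepA (st : List String × List String × List String × List String)
    (h : List (String × String)) : List String × List String × List String × List String :=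
  let ind := match hGet? h "IV" with
    | some v => if st.1.contains v then st.1 else st.1 ++ [v]
    | none => st.1
  let dep := match hGet? h "DV" with
    | some v => if st.2.1.contains v then st.2.1 else st.2.1 ++ [v]
    | none => st.2.1
  let mods := if hGet? h "type" = some "moderation" then
      match hGet? h "moderator" with
      | some v => st.2.2.1 ++ [v]
      | none => st.2.2.1
    else st.2.2.1
  let meds := if hGet? h "type" = some "mediation" then
      match hGet? h "mediator" with
      | some v => st.2.2.2 ++ [v]
      | none => st.2.2.2
    else st.2.2.2
  (ind, dep, mods, meds)

def extract_variables (hypotheses : List (List (String × String))) : List (String × List String) :=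
  let st := hypotheses.foldl stepA ([], [], [], [])
  [("independent", st.1), ("dependent", st.2.1), ("moderators", st.2.2.1),
   ("mediators", st.2.2.2), ("controls", ["age", "education", "gender"])]

-- ===== PORT B =====
-- Source B's dedup: emit the head, filter all its duplicates out of the remainder, repeat
def shrinkDedup : List String → List String
  | [] => []
  | x :: xs => x :: shrinkDedup (xs.filter (fun v => v != x))
termination_by l => l.length
decreasing_by
  simpa using Nat.lt_succ_of_le (List.length_filter_le _ xs)

def modOf (h : List (String × String)) : Option String :=
  if hGet? h "type" = some "moderation" then hGet? h "moderator" else none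

def medOf (h : List (String × String)) : Option String :=
  if hGet? h "type" = some "mediation" then hGet? h "mediator" else none

def extract_variables_alt (hypotheses : List (List (String × String))) : List (String × List String) :=
  [("independent", shrinkDedup (hypotheses.filterMap (fun h => hGet? h "IV"))),
   ("dependent", shrinkDedup (hypotheses.filterMap (fun h => hGet? h "DV"))),
   ("moderators", hypotheses.filterMap modOf),
   ("mediators", hypotheses.filterMap medOf),
   ("controls", ["age", "education", "gender"])]

-- ===== PRECONDITION & SPEC =====
def Spec_extract_variables (hypotheses : List (List (String × String))) (out : List (String × List String)) : Prop := out = extract_variables_alt hypotheses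
instance (hypotheses : List (List (String × String))) (out : List (String × List String)) : Decidable (Spec_extract_variables hypotheses out) := by unfold Spec_extract_variables; infer_instance

-- ===== CLAIM (what is proved, stated in full; the proofs are below) =====
def Claim_equal_extract_variables : Prop := ∀ (hypotheses : List (List (String × String))), Dom_extract_variables hypotheses → Spec_extract_variables hypotheses (extract_variables hypotheses)

-- ===== LEMMAS AND PROOFS =====
-- A's interleaved loop splits into four independent folds
lemma loop_eq (hyps : List (List (String × String))) (a b c d : List String) :
    hyps.foldl stepA (a, b, c, d) =
      (List.foldl PySem.Set.add a (hyps.filterMap (fun h => hGet? h "IV")),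
       List.foldl PySem.Set.add b (hyps.filterMap (fun h => hGet? h "DV")),
       c ++ hyps.filterMap modOf,
       d ++ hyps.filterMap medOf) := by
  induction hyps generalizing a b c d with
  | nil => simp
  | cons h t ih =>
    simp only [List.foldl_cons, List.filterMap_cons, stepA, modOf, medOf]
    rw [ih]
    cases hGet? h "IV" <;> cases hGet? h "DV" <;>
      by_cases hm : hGet? h "type" = some "moderation" <;>
      by_cases hd : hGet? h "type" = some "mediation" <;>
      cases hGet? h "moderator" <;> cases hGet? h "mediator" <;>
      simp [PySem.Set.add, modOf, medOf, hm, hd, List.append_assoc]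

lemma shrinkDedup_nil : shrinkDedup [] = [] := by
  rw [shrinkDedup]

lemma shrinkDedup_cons (x : String) (xs : List String) :
    shrinkDedup (x :: xs) = x :: shrinkDedup (xs.filter (fun v => v != x)) := by
  rw [shrinkDedup]

-- A's membership-append fold equals B's filter-shrinking dedup
lemma foldl_add_eq_shrinkDedup (l acc : List String) :
    List.foldl PySem.Set.add acc l
      = acc ++ shrinkDedup (l.filter (fun v => !acc.contains v)) := by
  induction l generalizing acc with
  | nil => simp [shrinkDedup_nil]
  | cons x xs ih =>
    simp only [List.foldl_cons, List.filter_cons]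
    by_cases hx : x ∈ acc
    · rw [show PySem.Set.add acc x = acc from by simp [PySem.Set.add, hx], ih]
      simp [hx]
    · rw [show PySem.Set.add acc x = acc ++ [x] from by simp [PySem.Set.add, hx], ih]
      have hfil : xs.filter (fun v => !(acc ++ [x]).contains v)
          = (xs.filter (fun v => !acc.contains v)).filter (fun v => v != x) := by
        rw [List.filter_filter]
        apply List.filter_congr
        intro a _
        by_cases hax : a = x <;> simp [hax]
      rw [hfil]
      simp [hx, shrinkDedup_cons]

-- ===== VERDICT (by name: the statement is the Claim_ definition above) =====
theorem extract_variables_spec : Claim_equal_extract_variables := by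
  intro hyps _
  unfold Spec_extract_variables extract_variables extract_variables_alt
  simp only [loop_eq, foldl_add_eq_shrinkDedup]
  simp
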